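-- pv_equiv track=rewrite | github.com/nickmachnik/google-kickstart | rounds/2021_A/l_shapes/l_shapes.py | find_segments
-- ===== SOURCE A (Python) =====
-- def find_segments(grid):
--     r, c = len(grid), len(grid[0])
--     col_segs = {}
--     row_segs = {}
--     for row in range(r):
--         for col in range(c):
--             if grid[row][col] == 1:
--                 # update vertical segments
--                 if col not in col_segs:
--                     col_segs[col] = [[row, row]]
--                 elif col_segs[col][-1][1] == row - 1:
--                     col_segs[col][-1][1] = row
--                 elif col_segs[col][-1][0] == col_segs[col][-1][1]:
--                     col_segs[col][-1] = [row, row]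
--                 else:
--                     col_segs[col].append([row, row])
--                 # update horizontal segments
--                 if row not in row_segs:
--                     row_segs[row] = [[col, col]]
--                 elif row_segs[row][-1][1] == col - 1:
--                     row_segs[row][-1][1] = col
--                 elif row_segs[row][-1][0] == row_segs[row][-1][1]:
--                     row_segs[row][-1] = [col, col]
--                 else:
--                     row_segs[row].append([col, col])
--
--     # clean up too short fragments at ends
--     clean_col_segs = {}
--     for col, seg in col_segs.items():
--         if seg[-1][0] == seg[-1][1]:
--             seg.pop()
--         if len(seg) > 0:
--             clean_col_segs[col] = seg
--
--     clean_row_segs = {}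
--     for row, seg in row_segs.items():
--         if seg[-1][0] == seg[-1][1]:
--             seg.pop()
--         if len(seg) > 0:
--             clean_row_segs[row] = seg
--
--     return clean_row_segs, clean_col_segs
-- ===== SOURCE B (Python) =====
-- def find_segments(grid):
--     r, c = len(grid), len(grid[0])
--
--     def runs(bits):
--         # maximal runs of consecutive 1-cells, kept only when length >= 2
--         segs = []
--         start = None
--         for k, v in enumerate(bits + [0]):
--             if v == 1:
--                 if start is None:
--                     start = k
--             else:
--                 if start is not None and k - 1 > start:
--                     segs.append([start, k - 1])
--                 start = None
--         return segs
--
--     row_segs = {}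
--     for i in range(r):
--         s = runs([grid[i][j] for j in range(c)])
--         if s:
--             row_segs[i] = s
--
--     # dict insertion order: columns in the order their first filled cell appears (row-major)
--     order = list(dict.fromkeys(j for i in range(r) for j in range(c) if grid[i][j] == 1))
--     col_segs = {}
--     for j in order:
--         s = runs([grid[i][j] for i in range(r)])
--         if s:
--             col_segs[j] = s
--     return row_segs, col_segs
-- ===== Notes on version B (the rewrite author's own statement) =====
-- stated objective: simpler
-- what changed: Replaces the incremental per-cell dict bookkeeping (extend/replace-singleton/append plus a trailing-singleton pop) by direct run-length extraction per row and per column, keeping only runs of length >= 2; column keys are emitted in first-occurrence order to match dict insertion order.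
import Mathlib
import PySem

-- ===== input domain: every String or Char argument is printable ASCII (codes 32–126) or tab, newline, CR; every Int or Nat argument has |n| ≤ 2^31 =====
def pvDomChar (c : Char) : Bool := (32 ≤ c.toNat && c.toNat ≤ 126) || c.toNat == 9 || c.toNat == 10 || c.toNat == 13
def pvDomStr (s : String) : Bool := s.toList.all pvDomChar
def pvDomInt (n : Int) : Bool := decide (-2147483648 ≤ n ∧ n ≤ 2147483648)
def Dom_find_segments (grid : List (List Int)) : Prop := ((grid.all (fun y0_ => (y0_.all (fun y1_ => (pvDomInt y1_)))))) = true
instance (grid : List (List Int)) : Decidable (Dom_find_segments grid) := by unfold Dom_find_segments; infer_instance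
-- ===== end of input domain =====

-- B replaces A's incremental per-cell dict bookkeeping (extend/replace-singleton/append + trailing pop)
-- by direct run-length extraction per row/column, keeping runs of length ≥ 2 (objective: simpler).

-- ===== PORT A =====
-- xs[-1] = v  (Python in-place assignment to the last element)
def pvSetLast (xs : List (List Int)) (v : List Int) : List (List Int) := xs.dropLast ++ [v]

-- the four-branch per-cell dict update A performs (k = dict key, p = new position)
def pvUpdA (d : PySem.Dict Int (List (List Int))) (k p : Int) : PySem.Dict Int (List (List Int)) :=
  if d.contains k = false then d.insert k [[p, p]]
  else
    let seg := d.getD k []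
    let last := PySem.List.pyGetD seg (-1) []
    if PySem.List.pyGetD last 1 0 = p - 1 then d.insert k (pvSetLast seg (PySem.List.pySetD last 1 p))
    else if PySem.List.pyGetD last 0 0 = PySem.List.pyGetD last 1 0 then d.insert k (pvSetLast seg [p, p])
    else d.insert k (seg ++ [[p, p]])

-- the cleanup body: pop the trailing singleton (seg.pop() = dropLast on the nonempty seg), keep if nonempty
def pvCleanStep (acc : PySem.Dict Int (List (List Int))) (p : Int × List (List Int)) :
    PySem.Dict Int (List (List Int)) :=
  let seg := p.2
  let last := PySem.List.pyGetD seg (-1) []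
  let seg := if PySem.List.pyGetD last 0 0 = PySem.List.pyGetD last 1 0 then seg.dropLast else seg
  if seg.length > 0 then acc.insert p.1 seg else acc

def find_segments (grid : List (List Int)) :
    (List (Int × List (List Int))) × (List (Int × List (List Int))) :=
  let r : Int := grid.length
  let c : Int := (PySem.List.pyGetD grid 0 []).length
  let cell : Int → Int → Int := fun i j => PySem.List.pyGetD (PySem.List.pyGetD grid i []) j 0
  let st :=
    (PySem.List.pyRange 0 r 1).foldl (fun st row =>
      (PySem.List.pyRange 0 c 1).foldl (fun st col =>
        if cell row col = 1 then (pvUpdA st.1 col row, pvUpdA st.2 row col) else st) st)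
      (PySem.Dict.empty, PySem.Dict.empty)
  let cleanCol := st.1.items.foldl pvCleanStep PySem.Dict.empty
  let cleanRow := st.2.items.foldl pvCleanStep PySem.Dict.empty
  (cleanRow.items, cleanCol.items)

-- ===== PORT B =====
-- B's runs(bits): scan bits ++ [0], tracking (collected segs, open-run start)
def pvRStep (st : List (List Int) × Option Int) (kv : Int × Int) : List (List Int) × Option Int :=
  if kv.2 = 1 then
    match st.2 with
    | none => (st.1, some kv.1)
    | some _ => st
  else
    match st.2 with
    | some a => ((if kv.1 - 1 > a then st.1 ++ [[a, kv.1 - 1]] else st.1), none)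
    | none => (st.1, none)

def pvRuns (bits : List Int) : List (List Int) :=
  ((PySem.List.enumerate (bits ++ [0]) 0).foldl pvRStep ([], none)).1

def find_segments_alt (grid : List (List Int)) :
    (List (Int × List (List Int))) × (List (Int × List (List Int))) :=
  let r : Int := grid.length
  let c : Int := (PySem.List.pyGetD grid 0 []).length
  let cell : Int → Int → Int := fun i j => PySem.List.pyGetD (PySem.List.pyGetD grid i []) j 0
  let rowD :=
    (PySem.List.pyRange 0 r 1).foldl (fun d i =>
      let s := pvRuns ((PySem.List.pyRange 0 c 1).map (fun j => cell i j))
      if s ≠ [] then d.insert i s else d) PySem.Dict.empty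
  -- list(dict.fromkeys(...)) = first occurrences in order = PySem.List.dedup
  let order := PySem.List.dedup
    ((PySem.List.pyRange 0 r 1).flatMap (fun i =>
      (PySem.List.pyRange 0 c 1).filter (fun j => cell i j = 1)))
  let colD :=
    order.foldl (fun d j =>
      let s := pvRuns ((PySem.List.pyRange 0 r 1).map (fun i => cell i j))
      if s ≠ [] then d.insert j s else d) PySem.Dict.empty
  (rowD.items, colD.items)

-- ===== PRECONDITION & SPEC =====
-- Pre_ excludes exactly the inputs where A raises IndexError: the empty grid (grid[0]) and
-- ragged grids with some row shorter than row 0 (grid[row][col] out of range).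
def Pre_find_segments (grid : List (List Int)) : Prop :=
  grid ≠ [] ∧ ∀ row ∈ grid, (grid.headD []).length ≤ row.length
instance (grid : List (List Int)) : Decidable (Pre_find_segments grid) := by
  unfold Pre_find_segments; infer_instance

def pvWitness_find_segments : List (List Int) := [[1, 1, 0], [0, 1, 0], [0, 1, 1]]

def Spec_find_segments (grid : List (List Int))
    (out : (List (Int × List (List Int))) × (List (Int × List (List Int)))) : Prop :=
  out = find_segments_alt grid
instance (grid : List (List Int)) (out : (List (Int × List (List Int))) × (List (Int × List (List Int)))) :
    Decidable (Spec_find_segments grid out) := by unfold Spec_find_segments; infer_instance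

-- ===== CLAIM (what is proved, stated in full; the proofs are below) =====
def Claim_equal_find_segments : Prop :=
  ∀ (grid : List (List Int)), Dom_find_segments grid → Pre_find_segments grid →
    Spec_find_segments grid (find_segments grid)

-- ===== LEMMAS AND PROOFS =====


-- the per-key value update A performs on an existing (nonempty) segment list
def pvAstep (seg : List (List Int)) (p : Int) : List (List Int) :=
  let last := PySem.List.pyGetD seg (-1) []
  if PySem.List.pyGetD last 1 0 = p - 1 then pvSetLast seg (PySem.List.pySetD last 1 p)
  else if PySem.List.pyGetD last 0 0 = PySem.List.pyGetD last 1 0 then pvSetLast seg [p, p]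
  else seg ++ [[p, p]]

def pvStep1 (seg : List (List Int)) (p : Int) : List (List Int) :=
  if seg = [] then [[p, p]] else pvAstep seg p

def pvValA (d : PySem.Dict Int (List (List Int))) (k p : Int) : List (List Int) :=
  if d.contains k = false then [[p, p]] else pvAstep (d.getD k []) p

-- value of the trailing-singleton cleanup
def pvCleanSeg (seg : List (List Int)) : List (List Int) :=
  let last := PySem.List.pyGetD seg (-1) []
  if PySem.List.pyGetD last 0 0 = PySem.List.pyGetD last 1 0 then seg.dropLast else seg

def pvCleanVal (seg : List (List Int)) : Option (List (List Int)) :=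
  let s := pvCleanSeg seg
  if s.length > 0 then some s else none

-- canonical run extraction: pvSpecC k bs = runs of length ≥ 2 in bits bs starting at index k;
-- pvSpecO a k bs = the same with an open run a..k-1 pending
mutual
def pvSpecC (k : Int) (bs : List Int) : List (List Int) :=
  match bs with
  | [] => []
  | b :: bs => if b = 1 then pvSpecO k (k + 1) bs else pvSpecC (k + 1) bs
def pvSpecO (a k : Int) (bs : List Int) : List (List Int) :=
  match bs with
  | [] => if a < k - 1 then [[a, k - 1]] else []
  | b :: bs => if b = 1 then pvSpecO a (k + 1) bs
               else (if a < k - 1 then [[a, k - 1]] else []) ++ pvSpecC (k + 1) bs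
end

-- positions (offset k) of the 1-cells of bs
def pvOnes (k : Int) (bs : List Int) : List Int :=
  match bs with
  | [] => []
  | b :: bs => if b = 1 then k :: pvOnes (k + 1) bs else pvOnes (k + 1) bs

def pvWfPre (pre : List (List Int)) : Prop := ∀ s ∈ pre, ∃ x y, s = [x, y] ∧ x < y

-- A's update is an insert of pvValA
theorem pvUpdA_eq (d : PySem.Dict Int (List (List Int))) (k p : Int) :
    pvUpdA d k p = d.insert k (pvValA d k p) := by
  unfold pvUpdA pvValA pvAstep pvSetLast
  by_cases h0 : d.contains k = false
  · simp [h0]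
  · by_cases h1 : PySem.List.pyGetD (PySem.List.pyGetD (d.getD k []) (-1) []) 1 0 = p - 1
    · simp [h0, h1]
    · by_cases h2 : PySem.List.pyGetD (PySem.List.pyGetD (d.getD k []) (-1) []) 0 0
          = PySem.List.pyGetD (PySem.List.pyGetD (d.getD k []) (-1) []) 1 0 <;> simp [h0, h1, h2]

theorem pvValA_ne_nil (d : PySem.Dict Int (List (List Int))) (k p : Int) : pvValA d k p ≠ [] := by
  unfold pvValA pvAstep pvSetLast
  by_cases h0 : d.contains k = false
  · simp [h0]
  · by_cases h1 : PySem.List.pyGetD (PySem.List.pyGetD (d.getD k []) (-1) []) 1 0 = p - 1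
    · simp [h0, h1]
    · by_cases h2 : PySem.List.pyGetD (PySem.List.pyGetD (d.getD k []) (-1) []) 0 0
          = PySem.List.pyGetD (PySem.List.pyGetD (d.getD k []) (-1) []) 1 0 <;> simp [h0, h1, h2]

theorem pvValA_eq_step1 (d : PySem.Dict Int (List (List Int))) (k p : Int)
    (hne : d.getD k [] = [] → d.contains k = false)
    (hco : d.contains k = false → d.getD k [] = []) :
    pvValA d k p = pvStep1 (d.getD k []) p := by
  unfold pvValA pvStep1
  by_cases h : d.contains k = false
  · simp [h, hco h]
  · have : d.getD k [] ≠ [] := fun he => h (hne he)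
    simp [h, this]

-- fold over a flatMap = nested fold
theorem pvFoldlFlatMap {α β γ : Type} (l : List α) (g : α → List β) (f : γ → β → γ) (init : γ) :
    (l.flatMap g).foldl f init = l.foldl (fun s a => (g a).foldl f s) init := by
  induction l generalizing init with
  | nil => rfl
  | cons x xs ih => simp [List.flatMap_cons, List.foldl_append, ih]

-- master lemma: per-key value of the insert fold
theorem pvGetD_foldA (l : List (Int × Int)) (key val : Int × Int → Int) :
    ∀ (d : PySem.Dict Int (List (List Int))),
      (∀ k, d.getD k [] = [] → d.contains k = false) →
      (∀ k, d.contains k = false → d.getD k [] = []) →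
      ∀ k, (l.foldl (fun d x => d.insert (key x) (pvValA d (key x) (val x))) d).getD k []
        = (l.filter (fun x => key x == k)).foldl (fun s x => pvStep1 s (val x)) (d.getD k []) := by
  induction l with
  | nil => intro d _ _ k; rfl
  | cons x xs ih =>
    intro d hne hco k
    have hne' : ∀ k', (d.insert (key x) (pvValA d (key x) (val x))).getD k' [] = [] →
        (d.insert (key x) (pvValA d (key x) (val x))).contains k' = false := by
      intro k'
      rw [PySem.Dict.getD_insert, PySem.Dict.contains_insert]
      by_cases hk : k' = key x
      · intro h
        rw [if_pos hk] at h
        exact absurd h (pvValA_ne_nil _ _ _)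
      · rw [if_neg hk]
        intro h
        simp [hk, hne k' h]
    have hco' : ∀ k', (d.insert (key x) (pvValA d (key x) (val x))).contains k' = false →
        (d.insert (key x) (pvValA d (key x) (val x))).getD k' [] = [] := by
      intro k'
      rw [PySem.Dict.getD_insert, PySem.Dict.contains_insert]
      by_cases hk : k' = key x
      · simp [hk]
      · simp only [if_neg hk]
        intro h
        simp only [Bool.or_eq_false_iff] at h
        exact hco k' h.2
    simp only [List.foldl_cons, List.filter_cons]
    rw [ih _ hne' hco' k, PySem.Dict.getD_insert]
    by_cases hk : key x = k
    · subst hk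
      rw [if_pos rfl]
      simp only [BEq.rfl, if_true, List.foldl_cons]
      rw [pvValA_eq_step1 d (key x) (val x) (hne _) (hco _)]
    · rw [if_neg (Ne.symm hk)]
      simp [hk]

-- conditional-insert fold builds its items by appending
theorem pvItemsCond {α : Type} (l : List α) (key : α → Int) (f : α → Option (List (List Int))) :
    ∀ (d : PySem.Dict Int (List (List Int))),
      (∀ a ∈ l, d.contains (key a) = false) → (l.map key).Nodup →
      (l.foldl (fun d a => match f a with | some v => d.insert (key a) v | none => d) d).items
        = d.items ++ l.filterMap (fun a => (f a).map (fun v => (key a, v))) := by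
  induction l with
  | nil => intro d _ _; simp
  | cons x xs ih =>
    intro d hfr hnd
    simp only [List.map_cons, List.nodup_cons] at hnd
    simp only [List.foldl_cons, List.filterMap_cons]
    cases hfa : f x with
    | none =>
      simp only [Option.map_none]
      exact ih d (fun a ha => hfr a (List.mem_cons_of_mem _ ha)) hnd.2
    | some v =>
      simp only [Option.map_some]
      have hfrx : d.contains (key x) = false := hfr x List.mem_cons_self
      have hfr' : ∀ a ∈ xs, (d.insert (key x) v).contains (key a) = false := by
        intro a ha
        rw [PySem.Dict.contains_insert]
        have : key a ≠ key x := by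
          intro h
          exact hnd.1 (h ▸ List.mem_map_of_mem ha)
        simp [this, hfr a (List.mem_cons_of_mem _ ha)]
      rw [ih _ hfr' hnd.2, PySem.Dict.items_insert_of_not_contains _ _ hfrx]
      simp

theorem pvCleanSeg_nil : pvCleanSeg [] = [] := rfl

theorem pvCleanSeg_concat (pre : List (List Int)) (a b : Int) (hab : a ≤ b) :
    pvCleanSeg (pre ++ [[a, b]]) = pre ++ (if a < b then [[a, b]] else []) := by
  unfold pvCleanSeg
  rw [PySem.List.pyGetD_neg_one_append_singleton]
  simp only [PySem.List.pyGetD]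
  norm_num
  by_cases h : a = b
  · simp [h]
  · have : a < b := lt_of_le_of_ne hab h
    simp [h, this]

theorem pvStep1_adj (pre : List (List Int)) (a b k : Int) (h : b = k - 1) :
    pvStep1 (pre ++ [[a, b]]) k = pre ++ [[a, k]] := by
  unfold pvStep1 pvAstep pvSetLast
  rw [if_neg (by simp)]
  simp only [PySem.List.pyGetD_neg_one_append_singleton]
  have h1 : PySem.List.pyGetD [a, b] 1 0 = b := rfl
  rw [h1, if_pos h]
  have h2 : PySem.List.pySetD [a, b] 1 k = [a, k] := rfl
  rw [h2, List.dropLast_concat]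

theorem pvStep1_rep (pre : List (List Int)) (a b k : Int) (hne : b ≠ k - 1) (heq : a = b) :
    pvStep1 (pre ++ [[a, b]]) k = pre ++ [[k, k]] := by
  unfold pvStep1 pvAstep pvSetLast
  rw [if_neg (by simp)]
  simp only [PySem.List.pyGetD_neg_one_append_singleton]
  have h1 : PySem.List.pyGetD [a, b] 1 0 = b := rfl
  have h0 : PySem.List.pyGetD [a, b] 0 0 = a := rfl
  rw [h1, h0, if_neg hne, if_pos heq, List.dropLast_concat]

theorem pvStep1_app (pre : List (List Int)) (a b k : Int) (hne : b ≠ k - 1) (hne2 : a ≠ b) :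
    pvStep1 (pre ++ [[a, b]]) k = (pre ++ [[a, b]]) ++ [[k, k]] := by
  unfold pvStep1 pvAstep pvSetLast
  rw [if_neg (by simp)]
  simp only [PySem.List.pyGetD_neg_one_append_singleton]
  have h1 : PySem.List.pyGetD [a, b] 1 0 = b := rfl
  have h0 : PySem.List.pyGetD [a, b] 0 0 = a := rfl
  rw [h1, h0, if_neg hne, if_neg hne2]

-- per-line A-side invariant: cleanup of the incremental fold = canonical runs
theorem pvALine (bs : List Int) :
    (∀ (k : Int) (acc : List (List Int)),
        (acc = [] ∨ ∃ pre a b, acc = pre ++ [[a, b]] ∧ pvWfPre pre ∧ a ≤ b ∧ b ≤ k - 2) →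
        pvCleanSeg (List.foldl pvStep1 acc (pvOnes k bs)) = pvCleanSeg acc ++ pvSpecC k bs) ∧
    (∀ (a k : Int) (pre : List (List Int)), pvWfPre pre → a ≤ k - 1 →
        pvCleanSeg (List.foldl pvStep1 (pre ++ [[a, k - 1]]) (pvOnes k bs)) = pre ++ pvSpecO a k bs) := by
  induction bs with
  | nil =>
    refine ⟨fun k acc _ => by simp [pvOnes, pvSpecC], fun a k pre hpre hak => ?_⟩
    simp only [pvOnes, pvSpecO, List.foldl_nil]
    exact pvCleanSeg_concat pre a (k - 1) hak
  | cons b bs ih =>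
    obtain ⟨ih1, ih2⟩ := ih
    constructor
    · intro k acc hacc
      by_cases hb : b = 1
      · simp only [pvOnes, List.foldl_cons, pvSpecC, hb, if_true]
        rcases hacc with h0 | ⟨pre, a2, b2, hEq, hwf, hab, hbk⟩
        · subst h0
          have hs : pvStep1 [] k = [] ++ [[k, (k + 1) - 1]] := by norm_num [pvStep1]
          rw [hs, ih2 k (k + 1) [] (fun s hs => absurd hs (List.not_mem_nil)) (by omega)]
          simp [pvCleanSeg_nil]
        · subst hEq
          by_cases he : a2 = b2
          · have hs : pvStep1 (pre ++ [[a2, b2]]) k = pre ++ [[k, (k + 1) - 1]] := by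
              rw [pvStep1_rep pre a2 b2 k (by omega) he]; norm_num
            rw [hs, ih2 k (k + 1) pre hwf (by omega),
                pvCleanSeg_concat pre a2 b2 hab, if_neg (by omega)]
            simp
          · have hs : pvStep1 (pre ++ [[a2, b2]]) k
                = (pre ++ [[a2, b2]]) ++ [[k, (k + 1) - 1]] := by
              rw [pvStep1_app pre a2 b2 k (by omega) he]; norm_num
            have hwf' : pvWfPre (pre ++ [[a2, b2]]) := by
              intro s hsm
              rcases List.mem_append.mp hsm with h | h
              · exact hwf s h
              · simp only [List.mem_singleton] at h
                exact ⟨a2, b2, h, lt_of_le_of_ne hab he⟩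
            rw [hs, ih2 k (k + 1) (pre ++ [[a2, b2]]) hwf' (by omega),
                pvCleanSeg_concat pre a2 b2 hab, if_pos (lt_of_le_of_ne hab he)]
      · simp only [pvOnes, if_neg hb, pvSpecC]
        refine ih1 (k + 1) acc ?_
        rcases hacc with h0 | ⟨pre, a2, b2, hEq, hwf, hab, hbk⟩
        · exact Or.inl h0
        · exact Or.inr ⟨pre, a2, b2, hEq, hwf, hab, by omega⟩
    · intro a k pre hpre hak
      by_cases hb : b = 1
      · simp only [pvOnes, List.foldl_cons, pvSpecO, hb, if_true]
        have hs : pvStep1 (pre ++ [[a, k - 1]]) k = pre ++ [[a, (k + 1) - 1]] := by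
          rw [pvStep1_adj pre a (k - 1) k rfl]; norm_num
        rw [hs]
        exact ih2 a (k + 1) pre hpre (by omega)
      · simp only [pvOnes, if_neg hb, pvSpecO]
        rw [ih1 (k + 1) (pre ++ [[a, k - 1]])
              (Or.inr ⟨pre, a, k - 1, rfl, hpre, hak, by omega⟩),
            pvCleanSeg_concat pre a (k - 1) hak]
        simp [List.append_assoc]

-- B-side: the runs scan computes the canonical runs
theorem pvBLine (bs : List Int) :
    (∀ (k : Int) (segs : List (List Int)),
        (PySem.List.enumerate (bs ++ [0]) k).foldl pvRStep (segs, none) = (segs ++ pvSpecC k bs, none)) ∧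
    (∀ (a k : Int) (segs : List (List Int)), a ≤ k - 1 →
        (PySem.List.enumerate (bs ++ [0]) k).foldl pvRStep (segs, some a) = (segs ++ pvSpecO a k bs, none)) := by
  induction bs with
  | nil =>
    constructor
    · intro k segs
      simp [PySem.List.enumerate_cons, pvRStep, pvSpecC]
    · intro a k segs hak
      simp only [List.nil_append, PySem.List.enumerate_cons, PySem.List.enumerate_nil,
        List.foldl_cons, List.foldl_nil, pvSpecO]
      unfold pvRStep
      norm_num
      by_cases h : a < k - 1
      · simp [h]
      · simp [h]
  | cons b bs ih =>
    obtain ⟨ih1, ih2⟩ := ih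
    constructor
    · intro k segs
      simp only [List.cons_append, PySem.List.enumerate_cons, List.foldl_cons, pvSpecC]
      by_cases hb : b = 1
      · have hs : pvRStep (segs, none) (k, b) = (segs, some k) := by simp [pvRStep, hb]
        rw [hs, if_pos hb, ih2 k (k + 1) segs (by omega)]
      · have hs : pvRStep (segs, none) (k, b) = (segs, none) := by
          unfold pvRStep; simp [hb]
        rw [hs, if_neg hb, ih1 (k + 1) segs]
    · intro a k segs hak
      simp only [List.cons_append, PySem.List.enumerate_cons, List.foldl_cons, pvSpecO]
      by_cases hb : b = 1
      · have hs : pvRStep (segs, some a) (k, b) = (segs, some a) := by simp [pvRStep, hb]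
        rw [hs, if_pos hb, ih2 a (k + 1) segs (by omega)]
      · have hs : pvRStep (segs, some a) (k, b)
            = (segs ++ (if a < k - 1 then [[a, k - 1]] else []), none) := by
          unfold pvRStep
          simp only [hb]
          by_cases h : a < k - 1
          · simp [h]
          · simp [h]
        rw [hs, if_neg hb, ih1 (k + 1) (segs ++ (if a < k - 1 then [[a, k - 1]] else []))]
        simp [List.append_assoc]

theorem pvRuns_eq (bits : List Int) : pvRuns bits = pvSpecC 0 bits := by
  unfold pvRuns
  rw [(pvBLine bits).1 0 []]
  simp

-- positions of ones of a mapped range = the filtered range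
theorem pvOnes_pyRange_aux (f : Int → Int) : ∀ (n : Nat) (a b : Int), (b - a).toNat = n →
    pvOnes a ((PySem.List.pyRange a b 1).map f)
      = (PySem.List.pyRange a b 1).filter (fun j => decide (f j = 1)) := by
  intro n
  induction n with
  | zero =>
    intro a b hn
    have : PySem.List.pyRange a b 1 = [] := by
      rw [PySem.List.pyRange_one]
      simp [hn]
    simp [this, pvOnes]
  | succ n ihn =>
    intro a b hn
    have hab : a < b := by omega
    rw [PySem.List.pyRange_one_cons hab]
    simp only [List.map_cons, List.filter_cons, pvOnes]
    rw [ihn (a + 1) b (by omega)]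
    by_cases h : f a = 1 <;> simp [h]

theorem pvOnes_pyRange (f : Int → Int) (a b : Int) :
    pvOnes a ((PySem.List.pyRange a b 1).map f)
      = (PySem.List.pyRange a b 1).filter (fun j => decide (f j = 1)) :=
  pvOnes_pyRange_aux f (b - a).toNat a b rfl

-- flatMap of blocks that are empty except at one key
theorem pvFlatMapSingle {β : Type} (l : List Int) (k : Int) (g : Int → List β)
    (hnd : l.Nodup) :
    l.flatMap (fun i => if i = k then g i else []) = if k ∈ l then g k else [] := by
  induction l with
  | nil => simp
  | cons x xs ih =>
    simp only [List.nodup_cons] at hnd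
    rw [List.flatMap_cons, ih hnd.2]
    by_cases hx : x = k
    · subst hx
      simp [hnd.1]
    · simp [hx, Ne.symm hx]

-- filtering a Nodup list by (j == k && q j)
theorem pvFilterEqSingle (l : List Int) (k : Int) (q : Int → Bool) (hnd : l.Nodup) :
    l.filter (fun j => j == k && q j) = if k ∈ l ∧ q k then [k] else [] := by
  induction l with
  | nil => simp
  | cons x xs ih =>
    simp only [List.nodup_cons] at hnd
    rw [List.filter_cons, ih hnd.2]
    by_cases hx : x = k
    · subst hx
      by_cases hq : q x <;> simp [hq, hnd.1]
    · have : (x == k) = false := by simp [hx]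
      simp only [this, Bool.false_and, Bool.false_eq_true, if_false]
      by_cases hm : k ∈ xs <;> simp [hm, Ne.symm hx]

theorem pvFlatMapIf {β : Type} (l : List Int) (q : Int → Bool) (h : Int → β) :
    l.flatMap (fun i => if q i then [h i] else []) = (l.filter q).map h := by
  induction l with
  | nil => simp
  | cons x xs ih =>
    rw [List.flatMap_cons, ih, List.filter_cons]
    by_cases hq : q x <;> simp [hq]

-- repeated Set.add of the same element
theorem pvAddRepeat {β : Type} (m : List β) (s : List Int) (x : Int) (hx : x ∉ s) :
    (m.map (fun _ => x)).foldl PySem.Set.add s = if m.isEmpty then s else s ++ [x] := by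
  cases m with
  | nil => simp
  | cons y ys =>
    simp only [List.map_cons, List.foldl_cons, List.isEmpty_cons, if_false, Bool.false_eq_true]
    have h1 : PySem.Set.add s x = s ++ [x] := by
      have : PySem.Set.contains s x = false := by
        simp [PySem.Set.contains, hx]
      show (if PySem.Set.contains s x then s else s ++ [x]) = s ++ [x]
      rw [this]; simp
    rw [h1]
    have : ∀ (zs : List β) (t : List Int), x ∈ t → (zs.map (fun _ => x)).foldl PySem.Set.add t = t := by
      intro zs
      induction zs with
      | nil => intro t _; rfl
      | cons z zs ihz =>
        intro t ht
        simp only [List.map_cons, List.foldl_cons]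
        have : PySem.Set.add t x = t := by
          have hc : PySem.Set.contains t x = true := by
            simp [PySem.Set.contains, ht]
          show (if PySem.Set.contains t x then t else t ++ [x]) = t
          rw [hc]; simp
        rw [this]
        exact ihz t ht
    exact this ys (s ++ [x]) (by simp)

theorem pvOfListFlatMapAux {β : Type} (w : Int → List β) :
    ∀ (l : List Int) (s : List Int), l.Nodup → (∀ i ∈ l, i ∉ s) →
      (l.flatMap (fun i => (w i).map (fun _ => i))).foldl PySem.Set.add s
        = s ++ l.filter (fun i => !(w i).isEmpty) := by
  intro l
  induction l with
  | nil => intro s _ _; simp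
  | cons x xs ih =>
    intro s hnd hs
    simp only [List.nodup_cons] at hnd
    rw [List.flatMap_cons, List.foldl_append, pvAddRepeat _ _ _ (hs x List.mem_cons_self),
        List.filter_cons]
    by_cases he : (w x).isEmpty
    · rw [if_pos he, ih s hnd.2 (fun i hi => hs i (List.mem_cons_of_mem _ hi))]
      simp [he]
    · rw [if_neg he]
      have : ∀ i ∈ xs, i ∉ s ++ [x] := by
        intro i hi
        simp only [List.mem_append, List.mem_singleton]
        rintro (h | h)
        · exact hs i (List.mem_cons_of_mem _ hi) h
        · exact hnd.1 (h ▸ hi)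
      rw [ih (s ++ [x]) hnd.2 this]
      simp [he]

theorem pvOfListFlatMap {β : Type} (l : List Int) (w : Int → List β) (hnd : l.Nodup) :
    PySem.Set.ofList (l.flatMap (fun i => (w i).map (fun _ => i)))
      = l.filter (fun i => !(w i).isEmpty) := by
  rw [PySem.Set.ofList_eq_foldl, pvOfListFlatMapAux w l [] hnd (by simp)]
  simp

theorem pvFilterMapSub {β : Type} (l : List Int) (p : Int → Bool) (g : Int → Option β)
    (h : ∀ x ∈ l, p x = false → g x = none) :
    l.filterMap g = (l.filter p).filterMap g := by
  induction l with
  | nil => simp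
  | cons x xs ih =>
    rw [List.filterMap_cons, List.filter_cons]
    by_cases hp : p x
    · rw [if_pos hp, List.filterMap_cons]
      cases g x <;> simp [ih (fun y hy => h y (List.mem_cons_of_mem _ hy))]
    · rw [if_neg hp, h x List.mem_cons_self (by simpa using hp),
          ih (fun y hy => h y (List.mem_cons_of_mem _ hy))]

theorem pvCleanVal_of (s R : List (List Int)) (h : pvCleanSeg s = R) :
    pvCleanVal s = if R = [] then none else some R := by
  unfold pvCleanVal
  rw [h]
  cases R <;> simp



-- abbreviations for the assembly proofs, parameterized by the cell function and dimensions
def pvCellF (grid : List (List Int)) (i j : Int) : Int :=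
  PySem.List.pyGetD (PySem.List.pyGetD grid i []) j 0
def pvR (grid : List (List Int)) : Int := (grid.length : Int)
def pvC (grid : List (List Int)) : Int := ((PySem.List.pyGetD grid 0 []).length : Int)
def pvRowBits (cell : Int → Int → Int) (c : Int) (i : Int) : List Int :=
  (PySem.List.pyRange 0 c 1).map (fun j => cell i j)
def pvColBits (cell : Int → Int → Int) (r : Int) (j : Int) : List Int :=
  (PySem.List.pyRange 0 r 1).map (fun i => cell i j)
def pvOnesRow (cell : Int → Int → Int) (c : Int) (i : Int) : List Int :=
  (PySem.List.pyRange 0 c 1).filter (fun j => decide (cell i j = 1))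
def pvL (cell : Int → Int → Int) (r c : Int) : List (Int × Int) :=
  ((PySem.List.pyRange 0 r 1).flatMap (fun i =>
    (PySem.List.pyRange 0 c 1).map (fun j => (i, j)))).filter
    (fun x => decide (cell x.1 x.2 = 1))
def pvG (bits : Int → List Int) (k : Int) : Option (Int × List (List Int)) :=
  if pvSpecC 0 (bits k) = [] then none else some (k, pvSpecC 0 (bits k))
def pvOut (grid : List (List Int)) :
    (List (Int × List (List Int))) × (List (Int × List (List Int))) :=
  ((PySem.List.pyRange 0 (pvR grid) 1).filterMap (pvG (pvRowBits (pvCellF grid) (pvC grid))),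
   (PySem.Set.ofList ((PySem.List.pyRange 0 (pvR grid) 1).flatMap
      (pvOnesRow (pvCellF grid) (pvC grid)))).filterMap
     (pvG (pvColBits (pvCellF grid) (pvR grid))))

theorem pvFilterFlatMap {α β : Type} (l : List α) (g : α → List β) (p : β → Bool) :
    (l.flatMap g).filter p = l.flatMap (fun a => (g a).filter p) := by
  induction l with
  | nil => simp
  | cons x xs ih => simp [List.flatMap_cons, List.filter_append, ih]

theorem pvL_eq (cell : Int → Int → Int) (r c : Int) :
    pvL cell r c = (PySem.List.pyRange 0 r 1).flatMap (fun i =>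
      (pvOnesRow cell c i).map (fun j => (i, j))) := by
  unfold pvL pvOnesRow
  rw [pvFilterFlatMap]
  refine List.flatMap_congr ?_
  intro i _
  rw [List.filter_map]
  rfl

theorem pvRowFilter (cell : Int → Int → Int) (r c : Int) (k : Int)
    (hk : k ∈ PySem.List.pyRange 0 r 1) :
    (pvL cell r c).filter (fun x => x.1 == k) = (pvOnesRow cell c k).map (fun j => (k, j)) := by
  rw [pvL_eq, pvFilterFlatMap]
  have hblocks : ∀ i, ((pvOnesRow cell c i).map (fun j => (i, j))).filter (fun x => x.1 == k)
      = if i = k then (pvOnesRow cell c i).map (fun j => (i, j)) else [] := by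
    intro i
    rw [List.filter_map]
    by_cases hik : i = k
    · subst hik
      simp [Function.comp_def]
    · have : ((fun (x : Int × Int) => x.1 == k) ∘ (fun j => (i, j))) = fun _ => false := by
        funext j; simp [hik]
      rw [this]
      simp [hik]
  calc (PySem.List.pyRange 0 r 1).flatMap
        (fun i => ((pvOnesRow cell c i).map (fun j => (i, j))).filter (fun x => x.1 == k))
      = (PySem.List.pyRange 0 r 1).flatMap
        (fun i => if i = k then (pvOnesRow cell c i).map (fun j => (i, j)) else []) := by
        exact List.flatMap_congr (fun i _ => hblocks i)
    _ = _ := by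
        rw [pvFlatMapSingle _ _ _ (PySem.List.nodup_pyRange_one 0 r)]
        simp [hk]

theorem pvColFilter (cell : Int → Int → Int) (r c : Int) (k : Int)
    (hk : k ∈ PySem.List.pyRange 0 c 1) :
    (pvL cell r c).filter (fun x => x.2 == k)
      = ((PySem.List.pyRange 0 r 1).filter
          (fun i => decide (cell i k = 1))).map (fun i => (i, k)) := by
  rw [pvL_eq, pvFilterFlatMap]
  have hblocks : ∀ i, ((pvOnesRow cell c i).map (fun j => (i, j))).filter (fun x => x.2 == k)
      = if decide (cell i k = 1) then [(i, k)] else [] := by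
    intro i
    rw [List.filter_map]
    have : ((fun (x : Int × Int) => x.2 == k) ∘ (fun j => (i, j))) = fun j => j == k := by
      funext j; rfl
    rw [this]
    unfold pvOnesRow
    rw [List.filter_filter, pvFilterEqSingle _ _ _ (PySem.List.nodup_pyRange_one 0 c)]
    by_cases hc : decide (cell i k = 1)
    · rw [if_pos ⟨hk, by simpa using hc⟩, if_pos hc]
      rfl
    · rw [if_neg (fun h => by simp_all), if_neg hc]
      rfl
  calc (PySem.List.pyRange 0 r 1).flatMap
        (fun i => ((pvOnesRow cell c i).map (fun j => (i, j))).filter (fun x => x.2 == k))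
      = (PySem.List.pyRange 0 r 1).flatMap
        (fun i => if decide (cell i k = 1) then [(i, k)] else []) := by
        exact List.flatMap_congr (fun i _ => hblocks i)
    _ = _ := pvFlatMapIf _ _ _

theorem pvLmapFst (cell : Int → Int → Int) (r c : Int) :
    (pvL cell r c).map (fun x => x.1) = (PySem.List.pyRange 0 r 1).flatMap
      (fun i => (pvOnesRow cell c i).map (fun _ => i)) := by
  rw [pvL_eq, List.map_flatMap]
  refine List.flatMap_congr (fun i _ => ?_)
  simp

theorem pvLmapSnd (cell : Int → Int → Int) (r c : Int) :
    (pvL cell r c).map (fun x => x.2)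
      = (PySem.List.pyRange 0 r 1).flatMap (pvOnesRow cell c) := by
  rw [pvL_eq, List.map_flatMap]
  refine List.flatMap_congr (fun i _ => ?_)
  simp

theorem pvMemFst (cell : Int → Int → Int) (r c k : Int)
    (hk : k ∈ PySem.Set.ofList ((pvL cell r c).map (fun x => x.1))) :
    k ∈ PySem.List.pyRange 0 r 1 := by
  rw [PySem.Set.mem_ofList, pvLmapFst] at hk
  obtain ⟨i, hi, hmem⟩ := List.mem_flatMap.mp hk
  obtain ⟨j, _, hj⟩ := List.mem_map.mp hmem
  exact hj ▸ hi

theorem pvMemSnd (cell : Int → Int → Int) (r c k : Int)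
    (hk : k ∈ PySem.Set.ofList ((pvL cell r c).map (fun x => x.2))) :
    k ∈ PySem.List.pyRange 0 c 1 := by
  rw [PySem.Set.mem_ofList, pvLmapSnd] at hk
  obtain ⟨i, _, hmem⟩ := List.mem_flatMap.mp hk
  unfold pvOnesRow at hmem
  exact List.mem_of_mem_filter hmem

theorem pvCleanFoldOnes (bits : List Int) :
    pvCleanSeg (List.foldl pvStep1 [] (pvOnes 0 bits)) = pvSpecC 0 bits := by
  rw [(pvALine bits).1 0 [] (Or.inl rfl), pvCleanSeg_nil, List.nil_append]

theorem pvGRow (cell : Int → Int → Int) (r c : Int) (k : Int)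
    (hk : k ∈ PySem.List.pyRange 0 r 1) :
    (pvCleanVal (((pvL cell r c).filter (fun x => x.1 == k)).foldl
        (fun s x => pvStep1 s x.2) [])).map (fun v => (k, v)) = pvG (pvRowBits cell c) k := by
  rw [pvRowFilter cell r c k hk, List.foldl_map]
  have hpos : (pvOnesRow cell c k) = pvOnes 0 (pvRowBits cell c k) := by
    unfold pvOnesRow pvRowBits
    rw [pvOnes_pyRange]
  rw [show (fun (s : List (List Int)) (j : Int) => pvStep1 s ((k, j)).2) = pvStep1 from rfl,
      hpos, pvCleanVal_of _ _ (pvCleanFoldOnes (pvRowBits cell c k))]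
  unfold pvG
  by_cases h : pvSpecC 0 (pvRowBits cell c k) = [] <;> simp [h]

theorem pvGCol (cell : Int → Int → Int) (r c : Int) (k : Int)
    (hk : k ∈ PySem.List.pyRange 0 c 1) :
    (pvCleanVal (((pvL cell r c).filter (fun x => x.2 == k)).foldl
        (fun s x => pvStep1 s x.1) [])).map (fun v => (k, v)) = pvG (pvColBits cell r) k := by
  rw [pvColFilter cell r c k hk, List.foldl_map]
  have hpos : (PySem.List.pyRange 0 r 1).filter (fun i => decide (cell i k = 1))
      = pvOnes 0 (pvColBits cell r k) := by
    unfold pvColBits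
    rw [pvOnes_pyRange]
  rw [show (fun (s : List (List Int)) (i : Int) => pvStep1 s ((i, k)).1) = pvStep1 from rfl,
      hpos, pvCleanVal_of _ _ (pvCleanFoldOnes (pvColBits cell r k))]
  unfold pvG
  by_cases h : pvSpecC 0 (pvColBits cell r k) = [] <;> simp [h]

theorem pvGRow_none (cell : Int → Int → Int) (c : Int) (k : Int)
    (h : (!(pvOnesRow cell c k).isEmpty) = false) : pvG (pvRowBits cell c) k = none := by
  have hone : pvOnesRow cell c k = [] := by
    cases he : pvOnesRow cell c k
    · rfl
    · rw [he] at h; simp at h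
  have hpos : pvOnes 0 (pvRowBits cell c k) = [] := by
    unfold pvRowBits
    rw [pvOnes_pyRange]
    exact hone
  have := pvCleanFoldOnes (pvRowBits cell c k)
  rw [hpos] at this
  simp only [List.foldl_nil, pvCleanSeg_nil] at this
  unfold pvG
  rw [if_pos this.symm]

-- the incremental insert fold, fully characterised
theorem pvDictItems (L : List (Int × Int)) (key val : Int × Int → Int) :
    (L.foldl (fun d x => d.insert (key x) (pvValA d (key x) (val x))) PySem.Dict.empty).items
      = (PySem.Set.ofList (L.map key)).map (fun k =>
          (k, (L.filter (fun x => key x == k)).foldl (fun s x => pvStep1 s (val x)) [])) := by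
  have hkeys : (L.foldl (fun d x => d.insert (key x) (pvValA d (key x) (val x)))
      PySem.Dict.empty).keys = PySem.Set.ofList (L.map key) := by
    rw [PySem.Dict.keys_foldl_insert_key L key
        (fun d x => pvValA d (key x) (val x)) PySem.Dict.empty, PySem.Dict.keys_empty]
    rw [PySem.Set.ofList_eq_foldl]
    rfl
  have hnd : (L.foldl (fun d x => d.insert (key x) (pvValA d (key x) (val x)))
      PySem.Dict.empty).keys.Nodup := by
    refine PySem.Dict.nodup_keys_foldl_insert_key L key _ PySem.Dict.empty ?_
    rw [PySem.Dict.keys_empty]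
    exact List.nodup_nil
  rw [PySem.Dict.items_eq_map_keys _ hnd [], hkeys]
  refine List.map_congr_left (fun k _ => ?_)
  rw [pvGetD_foldA L key val PySem.Dict.empty
      (fun k' _ => PySem.Dict.contains_empty k')
      (fun k' _ => PySem.Dict.getD_empty k' []) k, PySem.Dict.getD_empty]

-- the cleanup fold over a Nodup-keyed dict's items is a filterMap
theorem pvCleanItems (d : PySem.Dict Int (List (List Int))) (hnd : d.keys.Nodup) :
    (d.items.foldl pvCleanStep PySem.Dict.empty).items
      = d.items.filterMap (fun p => (pvCleanVal p.2).map (fun v => (p.1, v))) := by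
  have hbody : pvCleanStep = (fun acc (p : Int × List (List Int)) =>
      match pvCleanVal p.2 with
      | some v => acc.insert p.1 v
      | none => acc) := by
    funext acc p
    unfold pvCleanStep pvCleanVal pvCleanSeg
    by_cases h1 : PySem.List.pyGetD (PySem.List.pyGetD p.2 (-1) []) 0 0
        = PySem.List.pyGetD (PySem.List.pyGetD p.2 (-1) []) 1 0
    · by_cases h2 : p.2.dropLast.length > 0 <;> simp [h1] <;> (try (split <;> rfl))
    · by_cases h2 : p.2.length > 0 <;> simp [h1] <;> (try (split <;> rfl))
  rw [hbody, pvItemsCond d.items (fun p => p.1) (fun p => pvCleanVal p.2) PySem.Dict.empty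
      (fun p _ => PySem.Dict.contains_empty p.1) (by exact hnd)]
  rfl

-- B's conditional-insert dict builder, fully characterised
theorem pvCondFold (l : List Int) (hnd : l.Nodup) (bitsf : Int → List Int) :
    (l.foldl (fun d i =>
        let s := pvRuns (bitsf i);
        if s ≠ [] then d.insert i s else d) PySem.Dict.empty).items
      = l.filterMap (pvG bitsf) := by
  have hbody : (fun (d : PySem.Dict Int (List (List Int))) (i : Int) =>
      let s := pvRuns (bitsf i);
      if s ≠ [] then d.insert i s else d)
      = (fun d i =>
        match (fun k => if pvRuns (bitsf k) = [] then none else some (pvRuns (bitsf k))) i with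
        | some v => d.insert i v
        | none => d) := by
    funext d i
    by_cases h : pvRuns (bitsf i) = [] <;> simp [h]
  rw [hbody, pvItemsCond l (fun a => a)
      (fun k => if pvRuns (bitsf k) = [] then none else some (pvRuns (bitsf k)))
      PySem.Dict.empty (fun a _ => PySem.Dict.contains_empty a) (by simpa using hnd)]
  rw [show (PySem.Dict.empty : PySem.Dict Int (List (List Int))).items = [] from rfl,
      List.nil_append]
  refine List.filterMap_congr (fun k _ => ?_)
  rw [pvRuns_eq]
  unfold pvG
  by_cases h : pvSpecC 0 (bitsf k) = [] <;> simp [h]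

-- A's double loop over the grid, as two independent insert folds over the 1-cells
theorem pvAFold (cell : Int → Int → Int) (r c : Int) :
    (PySem.List.pyRange 0 r 1).foldl (fun st row =>
        (PySem.List.pyRange 0 c 1).foldl (fun st col =>
          if cell row col = 1 then (pvUpdA st.1 col row, pvUpdA st.2 row col) else st) st)
      (PySem.Dict.empty, PySem.Dict.empty)
      = ((pvL cell r c).foldl (fun d x => d.insert x.2 (pvValA d x.2 x.1)) PySem.Dict.empty,
         (pvL cell r c).foldl (fun d x => d.insert x.1 (pvValA d x.1 x.2)) PySem.Dict.empty) := by
  have h0 : (PySem.List.pyRange 0 r 1).foldl (fun st row =>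
        (PySem.List.pyRange 0 c 1).foldl (fun st col =>
          if cell row col = 1 then (pvUpdA st.1 col row, pvUpdA st.2 row col) else st) st)
      (PySem.Dict.empty, PySem.Dict.empty)
      = ((PySem.List.pyRange 0 r 1).flatMap (fun i =>
          (PySem.List.pyRange 0 c 1).map (fun j => (i, j)))).foldl
          (fun st x => if cell x.1 x.2 = 1 then (pvUpdA st.1 x.2 x.1, pvUpdA st.2 x.1 x.2) else st)
          (PySem.Dict.empty, PySem.Dict.empty) := by
    rw [pvFoldlFlatMap]
    simp only [List.foldl_map]
  rw [h0, PySem.List.foldl_ite_eq_foldl_filter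
      (p := fun x : Int × Int => cell x.1 x.2 = 1)
      (f := fun st x => (pvUpdA st.1 x.2 x.1, pvUpdA st.2 x.1 x.2))]
  have h2 := PySem.List.foldl_prod_mk (fun d (x : Int × Int) => pvUpdA d x.2 x.1)
      (fun d (x : Int × Int) => pvUpdA d x.1 x.2)
      (((PySem.List.pyRange 0 r 1).flatMap (fun i =>
          (PySem.List.pyRange 0 c 1).map (fun j => (i, j)))).filter
          (fun x => decide (cell x.1 x.2 = 1)))
      PySem.Dict.empty PySem.Dict.empty
  beta_reduce at h2
  unfold pvL
  rw [h2]
  simp only [pvUpdA_eq]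

theorem pvRawNodup (L : List (Int × Int)) (key val : Int × Int → Int) :
    (L.foldl (fun d x => d.insert (key x) (pvValA d (key x) (val x)))
      PySem.Dict.empty).keys.Nodup := by
  refine PySem.Dict.nodup_keys_foldl_insert_key L key _ PySem.Dict.empty ?_
  rw [PySem.Dict.keys_empty]
  exact List.nodup_nil

set_option maxHeartbeats 1000000 in
theorem pvA_eq (grid : List (List Int)) : find_segments grid = pvOut grid := by
  simp only [find_segments]
  rw [pvAFold]
  dsimp only
  rw [pvCleanItems _ (pvRawNodup (pvL (fun i j => PySem.List.pyGetD (PySem.List.pyGetD grid i []) j 0) (grid.length : Int) ((PySem.List.pyGetD grid 0 []).length : Int)) (fun x => x.1) (fun x => x.2)),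
      pvCleanItems _ (pvRawNodup (pvL (fun i j => PySem.List.pyGetD (PySem.List.pyGetD grid i []) j 0) (grid.length : Int) ((PySem.List.pyGetD grid 0 []).length : Int)) (fun x => x.2) (fun x => x.1)),
      pvDictItems _ (fun x => x.1) (fun x => x.2),
      pvDictItems _ (fun x => x.2) (fun x => x.1),
      List.filterMap_map, List.filterMap_map]
  unfold pvOut
  simp only [Function.comp_def]
  congr 1
  · rw [List.filterMap_congr (fun k hk => pvGRow _ _ _ k (pvMemFst _ _ _ k hk)),
        pvLmapFst, pvOfListFlatMap _ _ (PySem.List.nodup_pyRange_one 0 _),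
        ← pvFilterMapSub _ _ _ (fun x _ hx => pvGRow_none _ _ x hx)]
    rfl
  · rw [List.filterMap_congr (fun k hk => pvGCol _ _ _ k (pvMemSnd _ _ _ k hk)), pvLmapSnd]
    rfl

theorem pvB_eq (grid : List (List Int)) : find_segments_alt grid = pvOut grid := by
  simp only [find_segments_alt, pvOut]
  rw [PySem.List.dedup_eq_ofList,
      pvCondFold _ (PySem.List.nodup_pyRange_one 0 (grid.length : Int)) _,
      pvCondFold _ (PySem.Set.nodup_ofList _) _]
  rfl

-- ===== VERDICT (by name: the statement is the Claim_ definition above) =====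
theorem find_segments_spec : Claim_equal_find_segments := by
  intro grid _ _
  unfold Spec_find_segments
  rw [pvA_eq, pvB_eq]
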